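-- pv_equiv track=rewrite | github.com/pwillen/pyPOAcars | src/demod.py | detect_noise
-- ===== SOURCE A (Python) =====
-- def detect_noise(bytestream: bytearray, noise_threshold: int = 5) -> bool:
--     """
--     # Detect noise in the bytestream
--     :param bytestream: The input bytestream to check for noise.
--     :param noise_threshold: The threshold for noise detection.
--     :return: True if noise is detected, False otherwise.
--     """
--
--     noise_count = 0
--     for byte in bytestream:
--         if byte == 0x00:
--             noise_count += 1
--             if noise_count > noise_threshold:
--                 return True
--         else:
--             noise_count = 0
--     return False
-- ===== SOURCE B (Python) =====
-- from itertools import groupby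
--
--
-- def detect_noise(bytestream: bytearray, noise_threshold: int = 5) -> bool:
--     """Detect a run of more than noise_threshold consecutive zero bytes."""
--     return any(k == 0x00 and sum(1 for _ in g) > noise_threshold
--                for k, g in groupby(bytestream))
-- ===== Notes on version B (the rewrite author's own statement) =====
-- stated objective: idiomatic
-- what changed: Replaces the running zero-counter with early return by an itertools.groupby run-partitioning pass: any maximal run of equal bytes with key 0x00 and length > noise_threshold.
import Mathlib
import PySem

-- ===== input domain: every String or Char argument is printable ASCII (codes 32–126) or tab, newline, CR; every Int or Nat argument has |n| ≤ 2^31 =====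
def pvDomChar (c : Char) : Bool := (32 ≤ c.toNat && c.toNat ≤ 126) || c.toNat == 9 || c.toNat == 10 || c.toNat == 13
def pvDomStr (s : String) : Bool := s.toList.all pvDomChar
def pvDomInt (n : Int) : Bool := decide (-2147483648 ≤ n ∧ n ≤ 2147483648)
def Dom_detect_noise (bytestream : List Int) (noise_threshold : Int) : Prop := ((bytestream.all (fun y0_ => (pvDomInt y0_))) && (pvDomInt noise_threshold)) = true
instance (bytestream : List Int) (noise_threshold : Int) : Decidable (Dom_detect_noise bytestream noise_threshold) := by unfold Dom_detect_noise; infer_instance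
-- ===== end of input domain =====

-- ===== PORT A =====
-- B (my re-implementation) partitions the stream into maximal runs of equal bytes
-- (itertools.groupby) and checks for a zero-run longer than the threshold; return value only.

-- literal port of A's loop: running counter of consecutive zeros, early return on exceed
def detect_noise_loop (bytestream : List Int) (noise_count : Int) (noise_threshold : Int) : Bool :=
  match bytestream with
  | [] => false
  | b :: rest =>
    if b = 0 then
      if noise_count + 1 > noise_threshold then true
      else detect_noise_loop rest (noise_count + 1) noise_threshold
    else detect_noise_loop rest 0 noise_threshold

def detect_noise (bytestream : List Int) (noise_threshold : Int) : Bool :=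
  detect_noise_loop bytestream 0 noise_threshold

-- ===== PORT B =====
-- groupby: fold building the list of maximal runs (key, length), most recent run first
def pvRunsStep (acc : List (Int × Int)) (x : Int) : List (Int × Int) :=
  match acc with
  | (k, n) :: rest => if x = k then (k, n + 1) :: rest else (x, 1) :: (k, n) :: rest
  | [] => [(x, 1)]

def detect_noise_alt (bytestream : List Int) (noise_threshold : Int) : Bool :=
  (bytestream.foldl pvRunsStep []).any (fun p => p.1 = 0 && p.2 > noise_threshold)

-- ===== PRECONDITION & SPEC =====
def Spec_detect_noise (bytestream : List Int) (noise_threshold : Int) (out : Bool) : Prop := out = detect_noise_alt bytestream noise_threshold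
instance (bytestream : List Int) (noise_threshold : Int) (out : Bool) : Decidable (Spec_detect_noise bytestream noise_threshold out) := by unfold Spec_detect_noise; infer_instance

-- ===== CLAIM (what is proved, stated in full; the proofs are below) =====
def Claim_equal_detect_noise : Prop := ∀ (bytestream : List Int) (noise_threshold : Int), Dom_detect_noise bytestream noise_threshold → Spec_detect_noise bytestream noise_threshold (detect_noise bytestream noise_threshold)

-- ===== LEMMAS AND PROOFS =====

-- ===== VERDICT (by name: the statement is the Claim_ definition above) =====
-- the current count of trailing zeros, read off the run accumulator
def pvCurZ (acc : List (Int × Int)) : Int :=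
  match acc with
  | (0, n) :: _ => n
  | _ => 0

def pvAnyRun (acc : List (Int × Int)) (th : Int) : Bool :=
  acc.any (fun p => p.1 = 0 && p.2 > th)

theorem pvAnyRun_cons (k n th : Int) (rest : List (Int × Int)) :
    pvAnyRun ((k, n) :: rest) th = ((decide (k = 0) && decide (n > th)) || pvAnyRun rest th) := rfl

theorem pvAnyRun_step_true (acc : List (Int × Int)) (x th : Int)
    (h : pvAnyRun acc th = true) : pvAnyRun (pvRunsStep acc x) th = true := by
  match acc with
  | [] => simp [pvAnyRun] at h
  | (k, n) :: rest =>
    simp only [pvRunsStep]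
    split
    · simp only [pvAnyRun_cons, Bool.or_eq_true, Bool.and_eq_true, decide_eq_true_eq] at h ⊢
      rcases h with ⟨hk, hn⟩ | h
      · exact Or.inl ⟨hk, by omega⟩
      · exact Or.inr h
    · simp only [pvAnyRun_cons, Bool.or_eq_true, Bool.and_eq_true, decide_eq_true_eq] at h ⊢
      exact Or.inr h

theorem pvAnyRun_foldl_true (xs : List Int) (acc : List (Int × Int)) (th : Int)
    (h : pvAnyRun acc th = true) : pvAnyRun (xs.foldl pvRunsStep acc) th = true := by
  induction xs generalizing acc with
  | nil => exact h
  | cons x xs ih => exact ih _ (pvAnyRun_step_true acc x th h)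

theorem pvLoop_eq (xs : List Int) (acc : List (Int × Int)) (cnt th : Int)
    (hfalse : pvAnyRun acc th = false) (hcnt : cnt = pvCurZ acc) :
    detect_noise_loop xs cnt th = pvAnyRun (xs.foldl pvRunsStep acc) th := by
  induction xs generalizing acc cnt with
  | nil => simp [detect_noise_loop, hfalse]
  | cons b rest ih =>
    simp only [List.foldl_cons]
    by_cases hb : b = 0
    · subst hb
      -- describe the stepped accumulator uniformly
      obtain ⟨tail, hstep, htail, hcz⟩ :
          ∃ tail, pvRunsStep acc 0 = (0, cnt + 1) :: tail ∧
            pvAnyRun tail th = false ∧ pvCurZ ((0, cnt + 1) :: tail) = cnt + 1 := by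
        match acc with
        | [] =>
          have hc : cnt = 0 := by simpa [pvCurZ] using hcnt
          exact ⟨[], by simp [pvRunsStep, hc], rfl, by simp [pvCurZ]⟩
        | (k, n) :: tail2 =>
          by_cases hk : k = 0
          · subst hk
            have hc : cnt = n := by simpa [pvCurZ] using hcnt
            refine ⟨tail2, by simp [pvRunsStep, hc], ?_, by simp [pvCurZ]⟩
            simp only [pvAnyRun_cons, Bool.or_eq_false_iff] at hfalse
            exact hfalse.2
          · have hc : cnt = 0 := by
              simp only [pvCurZ] at hcnt
              split at hcnt
              · rename_i heq; cases heq; exact absurd rfl hk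
              · exact hcnt
            refine ⟨(k, n) :: tail2, by simp [pvRunsStep, hc, Ne.symm hk], ?_, by simp [pvCurZ]⟩
            exact hfalse
      rw [hstep]
      have hhead : pvAnyRun ((0, cnt + 1) :: tail) th =
          (decide (cnt + 1 > th) || pvAnyRun tail th) := by
        simp [pvAnyRun_cons]
      by_cases hgt : cnt + 1 > th
      · simp only [detect_noise_loop, if_pos hgt]
        have : pvAnyRun ((0, cnt + 1) :: tail) th = true := by
          rw [hhead]; simp [hgt]
        exact (pvAnyRun_foldl_true rest _ th this).symm
      · simp only [detect_noise_loop, if_neg hgt]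
        exact ih ((0, cnt + 1) :: tail) (cnt + 1)
          (by rw [hhead]; simp [hgt, htail]) hcz.symm
    · -- nonzero byte: counter resets; new head run has nonzero key
      simp only [detect_noise_loop, if_neg hb]
      have hs : pvAnyRun (pvRunsStep acc b) th = false ∧ pvCurZ (pvRunsStep acc b) = 0 := by
        match acc with
        | [] =>
          constructor
          · simp [pvRunsStep, pvAnyRun, hb]
          · simp only [pvRunsStep, pvCurZ]
            split
            · rename_i heq; cases heq; exact absurd rfl hb
            · rfl
        | (k, n) :: tail2 =>
          simp only [pvRunsStep]
          split
          · rename_i heq; subst heq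
            constructor
            · simp only [pvAnyRun_cons, Bool.or_eq_false_iff] at hfalse ⊢
              exact ⟨by simp [hb], hfalse.2⟩
            · simp only [pvCurZ]
              split
              · rename_i heq2; cases heq2; exact absurd rfl hb
              · rfl
          · constructor
            · simp only [pvAnyRun_cons, Bool.or_eq_false_iff] at hfalse ⊢
              exact ⟨by simp [hb], hfalse⟩
            · simp only [pvCurZ]
              split
              · rename_i heq2; cases heq2; exact absurd rfl hb
              · rfl
      exact ih (pvRunsStep acc b) 0 hs.1 hs.2.symm

theorem detect_noise_spec : Claim_equal_detect_noise := by
  intro bs th _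
  unfold Spec_detect_noise detect_noise detect_noise_alt
  have := pvLoop_eq bs [] 0 th (by simp [pvAnyRun]) (by simp [pvCurZ])
  rw [this]; rfl
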